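-- pv_equiv track=rewrite | github.com/noxlesh/pingmon | pingmon.py | gen_html
-- ===== SOURCE A (Python) =====
-- def gen_html(ping_stats, page_refr_time):
--     html = '<!DOCTYPE html>\n' \
--            '<html lang="ru"><head>\n'
--     if page_refr_time:# refresh equal zero for debug
--         html += '<meta http-equiv="refresh" content="%s">\n' % page_refr_time
--     html += '<meta name="viewport" content="width=device-width, initial-scale=1.0">\n' \
--             '<meta http-equiv="Content-Type" content="text/html; charset=utf-8">\n' \
--             '<link href="css/bootstrap.min.css" rel="stylesheet" media="screen">\n' \
--             '<link rel="stylesheet" href="css/bootstrap-theme.min.css">\n' \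
--             '</head><body>\n' \
--             '<div class="container"><div class="row"><div class="col-xs-6">\n' \
--             '<h4>Локальные хосты</h4>' \
--             '<table class="table table-bordered"><thead>\n' \
--             '<tr><th>Hostname</th><th>IP Address</th><th>Status</th></tr>\n' \
--             '</thead><tbody>\n'
--     for server in ping_stats:
--         if server[2] == 'l':
--             if server[3] == 'offline':
--                 html += '<tr class="danger">'
--             else:
--                 html += '<tr>'
--             html += '<td>%s</td><td>%s</td><td>%s</td>\n' %(server[0], server[1], server[3])
--     html += '</tbody>\n' \
--             '</table></div><div class="col-xs-6">\n' \
--             '<h4>VPN хосты</h4>' \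
--             '<table class="table table-bordered">\n' \
--             '<thead>\n' \
--             '<tr><th>Hostname</th><th>IP Address</th><th>Status</th></tr>\n' \
--             '</thead>\n' \
--             '<tbody>\n'
--     for server in ping_stats:
--         if server[2] == 'r':
--             if server[3] == 'offline':
--                 html += '<tr class="danger">'
--             else:
--                 html += '<tr>'
--             html += '<td>%s</td><td>%s</td><td>%s</td>\n' %(server[0], server[1], server[3])
--     html += '</tbody></table>\n' \
--             '</div></div></div>\n' \
--             '<script src="js/jquery.min.js"></script>\n' \
--             '<script src="js/bootstrap.min.js"></script>\n' \
--             '</body>\n' \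
--             '</html>\n'
--     return html
-- ===== SOURCE B (Python) =====
-- _HEAD1 = ('<!DOCTYPE html>\n'
--           '<html lang="ru"><head>\n')
-- _HEAD2 = ('<meta name="viewport" content="width=device-width, initial-scale=1.0">\n'
--           '<meta http-equiv="Content-Type" content="text/html; charset=utf-8">\n'
--           '<link href="css/bootstrap.min.css" rel="stylesheet" media="screen">\n'
--           '<link rel="stylesheet" href="css/bootstrap-theme.min.css">\n'
--           '</head><body>\n'
--           '<div class="container"><div class="row"><div class="col-xs-6">\n'
--           '<h4>Локальные хосты</h4>'
--           '<table class="table table-bordered"><thead>\n'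
--           '<tr><th>Hostname</th><th>IP Address</th><th>Status</th></tr>\n'
--           '</thead><tbody>\n')
-- _MID = ('</tbody>\n'
--         '</table></div><div class="col-xs-6">\n'
--         '<h4>VPN хосты</h4>'
--         '<table class="table table-bordered">\n'
--         '<thead>\n'
--         '<tr><th>Hostname</th><th>IP Address</th><th>Status</th></tr>\n'
--         '</thead>\n'
--         '<tbody>\n')
-- _TAIL = ('</tbody></table>\n'
--          '</div></div></div>\n'
--          '<script src="js/jquery.min.js"></script>\n'
--          '<script src="js/bootstrap.min.js"></script>\n'
--          '</body>\n'
--          '</html>\n')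
--
--
-- def _row(server):
--     cls = '<tr class="danger">' if server[3] == 'offline' else '<tr>'
--     return cls + '<td>%s</td><td>%s</td><td>%s</td>\n' % (server[0], server[1], server[3])
--
--
-- def gen_html(ping_stats, page_refr_time):
--     local_rows, vpn_rows = [], []
--     for server in ping_stats:
--         if server[2] == 'l':
--             local_rows.append(_row(server))
--         elif server[2] == 'r':
--             vpn_rows.append(_row(server))
--     refresh = ('<meta http-equiv="refresh" content="%s">\n' % page_refr_time) if page_refr_time else ''
--     return ''.join([_HEAD1, refresh, _HEAD2] + local_rows + [_MID] + vpn_rows + [_TAIL])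
-- ===== Notes on version B (the rewrite author's own statement) =====
-- stated objective: alternative
-- what changed: A builds the page by appending to one string across two sequential scans of ping_stats (local then vpn); B makes a single partitioning pass that buffers the formatted rows in two lists and then assembles the page with one ''.join of the fixed fragments and the two row groups.
import Mathlib
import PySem

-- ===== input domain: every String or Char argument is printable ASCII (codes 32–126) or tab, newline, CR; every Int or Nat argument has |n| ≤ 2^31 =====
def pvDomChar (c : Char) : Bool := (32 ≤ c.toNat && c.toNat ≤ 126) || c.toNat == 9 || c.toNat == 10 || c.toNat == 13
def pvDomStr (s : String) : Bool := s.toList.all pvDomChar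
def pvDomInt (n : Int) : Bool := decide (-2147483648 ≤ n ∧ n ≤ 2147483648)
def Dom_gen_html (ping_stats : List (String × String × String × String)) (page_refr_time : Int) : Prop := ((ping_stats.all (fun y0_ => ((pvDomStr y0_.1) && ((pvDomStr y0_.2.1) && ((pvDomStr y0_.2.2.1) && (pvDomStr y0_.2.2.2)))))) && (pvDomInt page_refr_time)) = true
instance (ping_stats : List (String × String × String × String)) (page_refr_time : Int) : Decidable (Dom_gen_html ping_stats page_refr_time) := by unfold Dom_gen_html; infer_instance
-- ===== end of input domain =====

-- B replaces A's two sequential scans over ping_stats by one partitioning pass that buffers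
-- the 'l' and 'r' rows in two lists, then assembles the page with ''.join (objective: alternative).

-- fixed HTML fragments shared by both ports (pure string constants, no logic)
def pvHead1 : String := "<!DOCTYPE html>\n<html lang=\"ru\"><head>\n"
def pvHead2 : String := "<meta name=\"viewport\" content=\"width=device-width, initial-scale=1.0\">\n<meta http-equiv=\"Content-Type\" content=\"text/html; charset=utf-8\">\n<link href=\"css/bootstrap.min.css\" rel=\"stylesheet\" media=\"screen\">\n<link rel=\"stylesheet\" href=\"css/bootstrap-theme.min.css\">\n</head><body>\n<div class=\"container\"><div class=\"row\"><div class=\"col-xs-6\">\n<h4>Локальные хосты</h4><table class=\"table table-bordered\"><thead>\n<tr><th>Hostname</th><th>IP Address</th><th>Status</th></tr>\n</thead><tbody>\n"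
def pvMid : String := "</tbody>\n</table></div><div class=\"col-xs-6\">\n<h4>VPN хосты</h4><table class=\"table table-bordered\">\n<thead>\n<tr><th>Hostname</th><th>IP Address</th><th>Status</th></tr>\n</thead>\n<tbody>\n"
def pvTail : String := "</tbody></table>\n</div></div></div>\n<script src=\"js/jquery.min.js\"></script>\n<script src=\"js/bootstrap.min.js\"></script>\n</body>\n</html>\n"

-- ===== PORT A =====
-- literal transliteration of A: string accumulator, two passes over ping_stats
def gen_html (ping_stats : List (String × String × String × String)) (page_refr_time : Int) : String :=
  let html := pvHead1
  let html := if page_refr_time ≠ 0 then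
      html ++ "<meta http-equiv=\"refresh\" content=\"" ++ PySem.Int.toStr page_refr_time ++ "\">\n"
    else html
  let html := html ++ pvHead2
  let html := ping_stats.foldl (fun h server =>
    if server.2.2.1 = "l" then
      (if server.2.2.2 = "offline" then h ++ "<tr class=\"danger\">" else h ++ "<tr>") ++
      "<td>" ++ server.1 ++ "</td><td>" ++ server.2.1 ++ "</td><td>" ++ server.2.2.2 ++ "</td>\n"
    else h) html
  let html := html ++ pvMid
  let html := ping_stats.foldl (fun h server =>
    if server.2.2.1 = "r" then
      (if server.2.2.2 = "offline" then h ++ "<tr class=\"danger\">" else h ++ "<tr>") ++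
      "<td>" ++ server.1 ++ "</td><td>" ++ server.2.1 ++ "</td><td>" ++ server.2.2.2 ++ "</td>\n"
    else h) html
  html ++ pvTail

-- ===== PORT B =====
def pvRow (server : String × String × String × String) : String :=
  (if server.2.2.2 = "offline" then "<tr class=\"danger\">" else "<tr>") ++
  "<td>" ++ server.1 ++ "</td><td>" ++ server.2.1 ++ "</td><td>" ++ server.2.2.2 ++ "</td>\n"

-- literal transliteration of B: one partitioning pass, then join of the fragments
def gen_html_alt (ping_stats : List (String × String × String × String)) (page_refr_time : Int) : String :=
  let acc := ping_stats.foldl (fun (acc : List String × List String) server =>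
    if server.2.2.1 = "l" then (acc.1 ++ [pvRow server], acc.2)
    else if server.2.2.1 = "r" then (acc.1, acc.2 ++ [pvRow server])
    else acc) ([], [])
  let refresh := if page_refr_time ≠ 0 then
      "<meta http-equiv=\"refresh\" content=\"" ++ PySem.Int.toStr page_refr_time ++ "\">\n"
    else ""
  String.join ([pvHead1, refresh, pvHead2] ++ acc.1 ++ [pvMid] ++ acc.2 ++ [pvTail])

-- ===== PRECONDITION & SPEC =====
def Spec_gen_html (ping_stats : List (String × String × String × String)) (page_refr_time : Int) (out : String) : Prop := out = gen_html_alt ping_stats page_refr_time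
instance (ping_stats : List (String × String × String × String)) (page_refr_time : Int) (out : String) : Decidable (Spec_gen_html ping_stats page_refr_time out) := by unfold Spec_gen_html; infer_instance

-- ===== CLAIM (what is proved, stated in full; the proofs are below) =====
def Claim_equal_gen_html : Prop := ∀ (ping_stats : List (String × String × String × String)) (page_refr_time : Int), Dom_gen_html ping_stats page_refr_time → Spec_gen_html ping_stats page_refr_time (gen_html ping_stats page_refr_time)

-- ===== LEMMAS AND PROOFS =====

theorem gen_html_foldl_shift (l : List String) (init : String) :
    List.foldl (fun r s => r ++ s) init l = init ++ List.foldl (fun r s => r ++ s) "" l := by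
  induction l generalizing init with
  | nil => simp
  | cons x xs ih =>
    simp only [List.foldl_cons]
    rw [ih (init ++ x), ih ("" ++ x)]
    simp [String.append_assoc]

theorem gen_html_join_cons (x : String) (xs : List String) :
    String.join (x :: xs) = x ++ String.join xs := by
  show List.foldl (fun r s => r ++ s) ("" ++ x) xs = _
  rw [gen_html_foldl_shift]
  simp [String.join]

-- A's tagged loop, with the accumulator generalized, appends exactly the joined rows
-- of the servers carrying that tag.
theorem gen_html_foldA (tag : String) (ps : List (String × String × String × String)) (h : String) :
    ps.foldl (fun h server =>
      if server.2.2.1 = tag then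
        (if server.2.2.2 = "offline" then h ++ "<tr class=\"danger\">" else h ++ "<tr>") ++
        "<td>" ++ server.1 ++ "</td><td>" ++ server.2.1 ++ "</td><td>" ++ server.2.2.2 ++ "</td>\n"
      else h) h
    = h ++ String.join ((ps.filter (fun s => s.2.2.1 = tag)).map pvRow) := by
  induction ps generalizing h with
  | nil => simp [String.join]
  | cons x xs ih =>
    simp only [List.foldl_cons, List.filter_cons]
    by_cases hx : x.2.2.1 = tag
    · simp only [hx, decide_true, if_true, ih, List.map_cons]
      rw [gen_html_join_cons]
      simp only [pvRow]
      split_ifs <;> simp [String.append_assoc]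
    · simp [hx, ih]

-- B's partitioning fold, with the accumulator generalized, yields the two filtered row lists.
theorem gen_html_foldB (ps : List (String × String × String × String)) (a b : List String) :
    ps.foldl (fun (acc : List String × List String) server =>
      if server.2.2.1 = "l" then (acc.1 ++ [pvRow server], acc.2)
      else if server.2.2.1 = "r" then (acc.1, acc.2 ++ [pvRow server])
      else acc) (a, b)
    = (a ++ (ps.filter (fun s => s.2.2.1 = "l")).map pvRow,
       b ++ (ps.filter (fun s => s.2.2.1 = "r")).map pvRow) := by
  induction ps generalizing a b with
  | nil => simp
  | cons x xs ih =>
    simp only [List.foldl_cons, List.filter_cons]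
    by_cases hl : x.2.2.1 = "l"
    · simp [hl, ih]
    · by_cases hr : x.2.2.1 = "r" <;> simp [hl, hr, ih]

theorem gen_html_join_append (xs ys : List String) :
    String.join (xs ++ ys) = String.join xs ++ String.join ys := by
  induction xs with
  | nil => simp [String.join]
  | cons x xs ih => simp [gen_html_join_cons, ih, String.append_assoc]

-- ===== VERDICT (by name: the statement is the Claim_ definition above) =====
theorem gen_html_spec : Claim_equal_gen_html := by
  intro ps t _
  show gen_html ps t = gen_html_alt ps t
  simp only [gen_html, gen_html_alt, gen_html_foldA, gen_html_foldB,
    gen_html_join_append, gen_html_join_cons]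
  split_ifs <;> simp [String.join, String.append_assoc]
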